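-- pv_equiv track=rewrite | github.com/yunsejin/Algorithm | 프로그래머스/0/181894. 2의 영역/2의 영역.py | solution
-- ===== SOURCE A (Python) =====
-- def solution(arr):
--     a = []
--     for i in range(len(arr)):
--         if arr[i] == 2:
--             a.append(i)
--     if len(a) == 0:
--         return [-1]
--     return arr[min(a):max(a)+1]
-- ===== SOURCE B (Python) =====
-- def solution(arr):
--     # single left-to-right streaming pass: emit elements into `core` once a 2 has
--     # been seen, buffering a run of non-2s in `pending` and flushing it only when
--     # another 2 arrives, so trailing non-2s are never emitted
--     core = []
--     pending = []
--     seen = False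
--     for x in arr:
--         if x == 2:
--             if seen:
--                 core += pending
--             pending = []
--             core.append(x)
--             seen = True
--         elif seen:
--             pending.append(x)
--     return core if seen else [-1]
-- ===== Notes on version B (the rewrite author's own statement) =====
-- stated objective: alternative
-- what changed: A collects every index holding a 2 into a list, takes min/max and slices; B never touches indices: a single streaming pass builds the output list directly, emitting elements once a 2 has been seen and buffering runs of non-2s that are flushed only when another 2 arrives, so trailing non-2s are never emitted.
import Mathlib
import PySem

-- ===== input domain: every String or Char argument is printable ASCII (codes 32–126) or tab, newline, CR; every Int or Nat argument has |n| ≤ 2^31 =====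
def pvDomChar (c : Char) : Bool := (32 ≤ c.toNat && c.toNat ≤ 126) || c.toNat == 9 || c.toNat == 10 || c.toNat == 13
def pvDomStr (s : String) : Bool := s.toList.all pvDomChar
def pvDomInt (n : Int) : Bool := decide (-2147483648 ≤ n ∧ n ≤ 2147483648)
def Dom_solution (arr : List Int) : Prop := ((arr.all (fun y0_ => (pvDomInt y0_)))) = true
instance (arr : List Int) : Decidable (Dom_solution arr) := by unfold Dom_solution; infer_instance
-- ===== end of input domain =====

-- B replaces A's index-collection + min/max + slice with a single streaming pass that builds the output list directly (no indices), buffering trailing non-2 runs; objective: alternative.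


-- ===== PORT A =====
def solution (arr : List Int) : List Int :=
  let a : List Int := (PySem.List.pyRange 0 (arr.length : Int)).foldl
    (fun acc i => if PySem.List.pyGetD arr i 0 == 2 then acc ++ [i] else acc) []
  if a.length = 0 then [-1]
  else
    match PySem.List.min? a (fun x => x), PySem.List.max? a (fun x => x) with
    | some mn, some mx => PySem.List.slice arr (some mn) (some (mx + 1))
    | _, _ => []  -- unreachable: a is nonempty here

-- ===== PORT B =====
-- streaming pass: state (core, pending, seen); each element goes to core (after a 2),
-- non-2s are buffered in pending and flushed into core only when another 2 arrives
def solution_alt (arr : List Int) : List Int :=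
  let s := arr.foldl
    (fun (st : List Int × List Int × Bool) x =>
      let core := st.1
      let pending := st.2.1
      let seen := st.2.2
      if x == 2 then ((if seen then core ++ pending else core) ++ [x], [], true)
      else if seen then (core, pending ++ [x], seen)
      else (core, pending, seen))
    ([], [], false)
  if s.2.2 then s.1 else [-1]

-- ===== PRECONDITION & SPEC =====
def Spec_solution (arr : List Int) (out : List Int) : Prop := out = solution_alt arr
instance (arr : List Int) (out : List Int) : Decidable (Spec_solution arr out) := by unfold Spec_solution; infer_instance

-- ===== CLAIM (what is proved, stated in full; the proofs are below) =====
def Claim_equal_solution : Prop := ∀ (arr : List Int), Dom_solution arr → Spec_solution arr (solution arr)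

-- ===== LEMMAS AND PROOFS =====

-- A's accumulated index list, in closed form.
def aIdx (arr : List Int) : List Int :=
  ((List.range arr.length).map (fun (k : Nat) => (k : Int))).filter
    (fun i => PySem.List.pyGetD arr i 0 == 2)

-- B's fold step, named for the proofs.
def stepB (st : List Int × List Int × Bool) (x : Int) : List Int × List Int × Bool :=
  if x == 2 then ((if st.2.2 then st.1 ++ st.2.1 else st.1) ++ [x], [], true)
  else if st.2.2 then (st.1, st.2.1 ++ [x], st.2.2)
  else (st.1, st.2.1, st.2.2)

-- the span of arr from the first 2 to the last 2 (front and back trims)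
def coreOf (p : List Int) : List Int :=
  ((p.dropWhile (fun x => x != 2)).reverse.dropWhile (fun x => x != 2)).reverse

-- the trailing run of non-2s
def pendOf (p : List Int) : List Int :=
  (p.reverse.takeWhile (fun x => x != 2)).reverse

theorem solution_a_eq (arr : List Int) :
    (PySem.List.pyRange 0 (arr.length : Int)).foldl
      (fun acc i => if PySem.List.pyGetD arr i 0 == 2 then acc ++ [i] else acc) []
    = aIdx arr := by
  rw [PySem.List.foldl_append_if_eq_filter, PySem.List.pyRange_zero_natCast, List.nil_append, aIdx]

theorem mem_a_iff (arr : List Int) (x : Int) :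
    x ∈ aIdx arr ↔ ∃ j : Nat, x = (j : Int) ∧ ∃ hj : j < arr.length, arr[j] = 2 := by
  unfold aIdx
  constructor
  · intro hx
    obtain ⟨hmem, hv⟩ := List.mem_filter.mp hx
    obtain ⟨j, hjr, rfl⟩ := List.mem_map.mp hmem
    have hj : j < arr.length := List.mem_range.mp hjr
    refine ⟨j, rfl, hj, ?_⟩
    simpa [PySem.List.pyGetD_natCast, List.getD_eq_getElem?_getD, List.getElem?_eq_getElem hj]
      using hv
  · rintro ⟨j, rfl, hj, hv⟩
    refine List.mem_filter.mpr ⟨List.mem_map.mpr ⟨j, List.mem_range.mpr hj, rfl⟩, ?_⟩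
    simp [PySem.List.pyGetD_natCast, List.getD_eq_getElem?_getD, List.getElem?_eq_getElem hj, hv]

-- dropWhile (· != 2) on a list whose leading non-2 run has length f
theorem dropWhile_eq_drop (xs : List Int) (f : Nat) (hf : f < xs.length)
    (hv : xs[f] = 2) (hmin : ∀ j (hj : j < xs.length), j < f → xs[j] ≠ 2) :
    xs.dropWhile (fun x => x != 2) = xs.drop f := by
  induction xs generalizing f with
  | nil => simp at hf
  | cons a t ih =>
    cases f with
    | zero =>
      simp only [List.getElem_cons_zero] at hv
      simp [hv]
    | succ k =>
      have ha : a ≠ 2 := by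
        have := hmin 0 (by simp) (by omega)
        simpa using this
      rw [List.dropWhile_cons, if_pos (by simp [ha]), List.drop_succ_cons]
      exact ih k (by simpa using hf) (by simpa using hv)
        (fun j hj hjk => by
          have := hmin (j+1) (by simpa using Nat.succ_lt_succ hj) (by omega)
          simpa using this)

theorem dropWhile_ne_nil_of_mem (p : List Int) (h2 : (2 : Int) ∈ p) :
    p.dropWhile (fun x => x != 2) ≠ [] := by
  intro h0
  rw [List.dropWhile_eq_nil_iff] at h0
  have := h0 2 h2
  simp at this

theorem takeWhile_len_ne (l : List Int) (h2 : (2 : Int) ∈ l) :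
    ¬ (l.takeWhile (fun x => x != 2)).length = l.length := by
  intro hlen
  have hpre := List.takeWhile_prefix (l := l) (fun x => x != 2)
  have heq : l.takeWhile (fun x => x != 2) = l := hpre.eq_of_length hlen
  have := List.mem_takeWhile_imp (l := l) (p := fun x => x != 2) (heq ▸ h2)
  simp at this

-- the streaming fold in closed form
theorem foldB_eq (p : List Int) :
    p.foldl stepB ([], [], false) =
      if (2 : Int) ∈ p then (coreOf p, pendOf p, true) else ([], [], false) := by
  induction p using List.reverseRecOn with
  | nil => simp
  | append_singleton p x ih =>
    rw [List.foldl_append, List.foldl_cons, List.foldl_nil, ih]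
    by_cases h2 : (2 : Int) ∈ p
    · rw [if_pos h2, if_pos (by simp [h2])]
      have hq := dropWhile_ne_nil_of_mem p h2
      have hdw : (p ++ [x]).dropWhile (fun y => y != 2)
          = p.dropWhile (fun y => y != 2) ++ [x] := by
        rw [List.dropWhile_append, if_neg (by simpa [List.isEmpty_iff] using hq)]
      by_cases hx : x = 2
      · subst hx
        -- coreOf p ++ pendOf p = p.dropWhile (· != 2)
        have hsplit : coreOf p ++ pendOf p = p.dropWhile (fun y => y != 2) := by
          set q := p.dropWhile (fun y => y != 2) with hqdef
          have h2q : (2 : Int) ∈ q.reverse := by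
            have : (2 : Int) ∈ q := by
              have := List.takeWhile_append_dropWhile (p := fun y => y != 2) (l := p)
              rcases List.mem_append.mp (by rw [this]; exact h2) with h | h
              · have := List.mem_takeWhile_imp h; simp at this
              · exact h
            simpa using this
          have hpend : pendOf p = (q.reverse.takeWhile (fun y => y != 2)).reverse := by
            unfold pendOf
            have hpr : p.reverse = q.reverse ++ (p.takeWhile (fun y => y != 2)).reverse := by
              rw [← List.reverse_append, List.takeWhile_append_dropWhile]
            rw [hpr, List.takeWhile_append,
              if_neg (by simpa using takeWhile_len_ne q.reverse h2q)]
          rw [hpend]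
          unfold coreOf
          rw [← hqdef, ← List.reverse_append, List.takeWhile_append_dropWhile,
            List.reverse_reverse]
        have hcore : coreOf (p ++ [2]) = coreOf p ++ pendOf p ++ [2] := by
          unfold coreOf at hsplit ⊢
          rw [hdw, List.reverse_append]
          simp only [List.reverse_cons, List.reverse_nil, List.nil_append,
            List.singleton_append]
          rw [List.dropWhile_cons]
          simp only [show ((2:Int) != 2) = false by simp, Bool.false_eq_true, if_false]
          rw [List.reverse_cons, List.reverse_reverse, hsplit]
        have hpend2 : pendOf (p ++ [2]) = [] := by
          unfold pendOf
          rw [List.reverse_append]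
          simp
        rw [hcore, hpend2]
        simp [stepB]
      · have hcore : coreOf (p ++ [x]) = coreOf p := by
          unfold coreOf
          rw [hdw, List.reverse_append]
          simp only [List.reverse_cons, List.reverse_nil, List.nil_append,
            List.singleton_append]
          rw [List.dropWhile_cons]
          simp [hx]
        have hpend2 : pendOf (p ++ [x]) = pendOf p ++ [x] := by
          unfold pendOf
          rw [List.reverse_append]
          simp only [List.reverse_cons, List.reverse_nil, List.nil_append,
            List.singleton_append]
          rw [List.takeWhile_cons]
          simp [hx]
        rw [hcore, hpend2]
        simp [stepB, hx]
    · rw [if_neg h2]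
      have hdw : p.dropWhile (fun y => y != 2) = [] := by
        rw [List.dropWhile_eq_nil_iff]
        intro y hy
        simp only [bne_iff_ne, ne_eq]
        intro h; subst h; exact h2 hy
      by_cases hx : x = 2
      · subst hx
        rw [if_pos (by simp)]
        have hcore : coreOf (p ++ [2]) = [2] := by
          unfold coreOf
          rw [List.dropWhile_append, if_pos (by simp [hdw])]
          simp
        have hpend2 : pendOf (p ++ [2]) = [] := by
          unfold pendOf
          rw [List.reverse_append]
          simp
        rw [hcore, hpend2]
        simp [stepB]
      · have hnx : (2 : Int) ∉ p ++ [x] := by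
          simp only [List.mem_append, List.mem_singleton]
          rintro (h | h)
          · exact h2 h
          · exact hx h.symm
        rw [if_neg hnx]
        simp [stepB, hx]

-- B in closed form
theorem solution_alt_closed (arr : List Int) :
    solution_alt arr = if (2 : Int) ∈ arr then coreOf arr else [-1] := by
  have h : solution_alt arr =
      (let s := arr.foldl stepB ([], [], false); if s.2.2 then s.1 else [-1]) := rfl
  rw [h, foldB_eq]
  by_cases h2 : (2 : Int) ∈ arr <;> simp [h2]

-- first/last occurrence of 2, with their extremal properties
theorem exists_first_last (arr : List Int) (h2 : (2 : Int) ∈ arr) :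
    ∃ f g : Nat, ∃ hf : f < arr.length, ∃ hg : g < arr.length,
      arr[f] = 2 ∧ arr[g] = 2 ∧
      (∀ j (hj : j < arr.length), arr[j] = 2 → f ≤ j ∧ j ≤ g) := by
  obtain ⟨f, hfi⟩ : ∃ f, PySem.List.index? arr 2 = some f :=
    Option.isSome_iff_exists.mp ((PySem.List.index?_isSome_iff arr 2).mpr h2)
  obtain ⟨r, hri⟩ : ∃ r, PySem.List.index? arr.reverse 2 = some r :=
    Option.isSome_iff_exists.mp
      ((PySem.List.index?_isSome_iff arr.reverse 2).mpr (by simpa using h2))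
  obtain ⟨hflt, hfv, hfmin⟩ := PySem.List.getElem_of_index?_eq_some hfi
  obtain ⟨hrlt, hrv, hrmin⟩ := PySem.List.getElem_of_index?_eq_some hri
  have hrlt' : r < arr.length := by simpa using hrlt
  refine ⟨f, arr.length - 1 - r, hflt, by omega, hfv, ?_, ?_⟩
  · have := hrv; rwa [List.getElem_reverse] at this
  · intro j hj hjv
    constructor
    · by_contra hc
      exact hfmin j (by omega) hjv
    · by_contra hc
      have := hrmin (arr.length - 1 - j) (by omega)
      rw [List.getElem_reverse] at this
      exact this (by
        have he : arr.length - 1 - (arr.length - 1 - j) = j := by omega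
        simpa [he] using hjv)

-- A returns the drop/take span
theorem solution_eq_span (arr : List Int) (f g : Nat)
    (hf : f < arr.length) (hg : g < arr.length)
    (hfv : arr[f] = 2) (hgv : arr[g] = 2)
    (hext : ∀ j (hj : j < arr.length), arr[j] = 2 → f ≤ j ∧ j ≤ g) :
    solution arr = (arr.drop f).take (g + 1 - f) := by
  unfold solution
  rw [solution_a_eq]
  have hane : aIdx arr ≠ [] := by
    intro h0
    have : (f : Int) ∈ aIdx arr := (mem_a_iff arr _).mpr ⟨f, rfl, hf, hfv⟩
    simp [h0] at this
  obtain ⟨mn, hmn⟩ : ∃ mn, PySem.List.min? (aIdx arr) (fun x => x) = some mn := by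
    cases h : PySem.List.min? (aIdx arr) (fun x => x) with
    | none => exact absurd ((PySem.List.min?_eq_none_iff _ _).mp h) hane
    | some m => exact ⟨m, rfl⟩
  obtain ⟨mx, hmx⟩ : ∃ mx, PySem.List.max? (aIdx arr) (fun x => x) = some mx := by
    cases h : PySem.List.max? (aIdx arr) (fun x => x) with
    | none => exact absurd ((PySem.List.max?_eq_none_iff _ _).mp h) hane
    | some m => exact ⟨m, rfl⟩
  have hmn_eq : mn = (f : Int) := by
    obtain ⟨j, hjx, hj, hjv⟩ := (mem_a_iff arr mn).mp (PySem.List.min?_mem hmn)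
    have h1 : mn ≤ (f : Int) :=
      PySem.List.min?_isMin hmn _ ((mem_a_iff arr _).mpr ⟨f, rfl, hf, hfv⟩)
    have h2 := (hext j hj hjv).1
    omega
  have hmx_eq : mx = (g : Int) := by
    obtain ⟨j, hjx, hj, hjv⟩ := (mem_a_iff arr mx).mp (PySem.List.max?_mem hmx)
    have h1 : (g : Int) ≤ mx :=
      PySem.List.max?_isMax hmx _ ((mem_a_iff arr _).mpr ⟨g, rfl, hg, hgv⟩)
    have h2 := (hext j hj hjv).2
    omega
  have halen : (aIdx arr).length ≠ 0 := fun h0 => hane (List.eq_nil_of_length_eq_zero h0)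
  simp only [halen, if_false, hmn, hmx, hmn_eq, hmx_eq]
  have : (g : Int) + 1 = ((g + 1 : Nat) : Int) := by push_cast; ring
  rw [this, PySem.List.slice_natCast]

-- B returns the same span
theorem solution_alt_eq_span (arr : List Int) (f g : Nat)
    (hf : f < arr.length) (hg : g < arr.length)
    (hfv : arr[f] = 2) (hgv : arr[g] = 2)
    (hext : ∀ j (hj : j < arr.length), arr[j] = 2 → f ≤ j ∧ j ≤ g) :
    solution_alt arr = (arr.drop f).take (g + 1 - f) := by
  have h2 : (2 : Int) ∈ arr := by rw [← hfv]; exact List.getElem_mem _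
  rw [solution_alt_closed, if_pos h2]
  have hfg : f ≤ g := (hext f hf hfv).2
  have hdw : arr.dropWhile (fun x => x != 2) = arr.drop f :=
    dropWhile_eq_drop arr f hf hfv
      (fun j hj hjf hv => by have := (hext j hj hv).1; omega)
  unfold coreOf
  rw [hdw]
  set xs := arr.drop f with hxs
  have hxslen : xs.length = arr.length - f := by simp [hxs]
  have hxget : ∀ (j : Nat) (hj : j < xs.length), xs[j] = arr[f + j]'(by omega) := by
    intro j hj
    simp [hxs, List.getElem_drop]
  have hk : arr.length - 1 - g < xs.reverse.length := by simp [hxslen]; omega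
  have hdw2 : xs.reverse.dropWhile (fun x => x != 2) = xs.reverse.drop (arr.length - 1 - g) := by
    apply dropWhile_eq_drop xs.reverse (arr.length - 1 - g) hk
    · rw [List.getElem_reverse, hxget]
      have he : f + (xs.length - 1 - (arr.length - 1 - g)) = g := by omega
      simp only [he]
      exact hgv
    · intro j hj hjk
      rw [List.getElem_reverse, hxget]
      intro hv
      have := (hext (f + (xs.length - 1 - j)) (by omega) hv).2
      omega
  rw [hdw2, List.reverse_drop, List.reverse_reverse]
  congr 1
  simp only [List.length_reverse, hxslen]
  omega

theorem solution_eq_alt (arr : List Int) : solution arr = solution_alt arr := by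
  by_cases h2 : (2 : Int) ∈ arr
  · obtain ⟨f, g, hf, hg, hfv, hgv, hext⟩ := exists_first_last arr h2
    rw [solution_eq_span arr f g hf hg hfv hgv hext,
      solution_alt_eq_span arr f g hf hg hfv hgv hext]
  · -- no 2: both return [-1]
    have hfilt : aIdx arr = [] := by
      rw [aIdx, List.filter_eq_nil_iff]
      intro x hx
      obtain ⟨j, hjr, rfl⟩ := List.mem_map.mp hx
      have hj : j < arr.length := List.mem_range.mp hjr
      simp only [PySem.List.pyGetD_natCast, beq_iff_eq, List.getD_eq_getElem?_getD,
        List.getElem?_eq_getElem hj]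
      intro hv
      exact h2 (by rw [← hv]; exact List.getElem_mem _)
    rw [solution_alt_closed, if_neg h2]
    unfold solution
    rw [solution_a_eq, hfilt]
    simp

-- ===== VERDICT (by name: the statement is the Claim_ definition above) =====
theorem solution_spec : Claim_equal_solution := by
  intro arr _
  exact solution_eq_alt arr
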